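-- pv_equiv track=rewrite | github.com/pritamleo841/GFG-CODE-SOLUTIONS-PYTHON | Difficulty: Medium/Shortest XY distance in Grid/shortest-xy-distance-in-grid.py | shortestXYDist
-- ===== SOURCE A (Python) =====
-- from collections import deque
--
-- def shortestXYDist(grid, N, M):
--     # code here
--     #the trick here is to start from Y and find X; not vice versa
--     #using bfs algorithm only. Go for cardinal directions only
--     directions = [
--         (-1,0),(0,1),(1,0),(0,-1)
--     ]
--     queue=deque()
--     visited = set()
--
--     def isInBoundary(r,c):
--         return 0<=r<N and 0<=c<M
--
--     for u in range(N):
--         for v in range(M):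
--             if grid[u][v]=='Y':
--                 queue.append((u,v,0))
--                 visited.add((u,v))
--     while queue:
--         row,col,dist = queue.popleft()
--         if grid[row][col]=='X':
--             return dist
--         for dr,dc in directions:
--             nr,nc = row+dr,col+dc
--             if(isInBoundary(nr,nc) and (nr,nc) not in visited):
--                     queue.append((nr,nc,dist+1))
--                     visited.add((nr,nc))
--     return -1
-- ===== SOURCE B (Python) =====
-- def shortestXYDist(grid, N, M):
--     # No cell blocks movement, so BFS distance = Manhattan distance:
--     # collect all X and Y positions in one scan and take the min Manhattan distance.
--     xs = []
--     ys = []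
--     for u in range(N):
--         for v in range(M):
--             ch = grid[u][v]
--             if ch == 'X':
--                 xs.append((u, v))
--             elif ch == 'Y':
--                 ys.append((u, v))
--     if not xs or not ys:
--         return -1
--     return min(abs(xr - yr) + abs(xc - yc) for (xr, xc) in xs for (yr, yc) in ys)
-- ===== Notes on version B (the rewrite author's own statement) =====
-- stated objective: alternative
-- what changed: Replaces the multi-source BFS frontier expansion with a single scan collecting X and Y positions followed by a closed-form minimum of Manhattan distances over all X-Y pairs (valid because no cell is blocked).
import Mathlib
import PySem

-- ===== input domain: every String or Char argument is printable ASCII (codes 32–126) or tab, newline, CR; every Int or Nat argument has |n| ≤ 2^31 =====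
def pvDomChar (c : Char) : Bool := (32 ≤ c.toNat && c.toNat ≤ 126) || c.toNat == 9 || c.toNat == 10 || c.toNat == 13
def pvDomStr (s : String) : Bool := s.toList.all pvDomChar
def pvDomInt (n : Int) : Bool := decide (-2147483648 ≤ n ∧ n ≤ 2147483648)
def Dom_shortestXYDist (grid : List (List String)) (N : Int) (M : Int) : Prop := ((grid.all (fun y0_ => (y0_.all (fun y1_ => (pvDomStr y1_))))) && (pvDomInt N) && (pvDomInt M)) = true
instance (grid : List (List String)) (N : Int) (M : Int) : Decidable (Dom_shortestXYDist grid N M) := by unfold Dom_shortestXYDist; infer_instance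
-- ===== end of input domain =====

-- B replaces A's multi-source BFS with one scan plus a closed-form min of Manhattan
-- distances over all X-Y pairs (no cell is ever blocked); alternative decomposition, similar cost.


-- ===== PORT A =====
-- grid[u][v]; total form with default "" — Pre_ excludes the out-of-range accesses on which Python raises
def pvCell (grid : List (List String)) (r c : Int) : String :=
  PySem.List.pyGetD (PySem.List.pyGetD grid r []) c ""

def pvDirs : List (Int × Int) := [(-1, 0), (0, 1), (1, 0), (0, -1)]

-- the initial double loop: enqueue every 'Y' cell with distance 0 and mark it visited
def pvInitA (grid : List (List String)) (N M : Int) :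
    List (Int × Int × Int) × PySem.Set (Int × Int) :=
  (PySem.List.pyRange 0 N 1).foldl (fun st u =>
    (PySem.List.pyRange 0 M 1).foldl (fun st v =>
      if pvCell grid u v == "Y" then (st.1 ++ [(u, v, (0 : Int))], PySem.Set.add st.2 (u, v))
      else st) st) ([], PySem.Set.ofList [])

-- the BFS while-loop; fuel only makes the recursion structural (the proof shows it never runs out)
def pvBfs (grid : List (List String)) (N M : Int) :
    Nat → List (Int × Int × Int) → PySem.Set (Int × Int) → Int
  | _, [], _ => -1
  | 0, _, _ => -1
  | fuel + 1, (row, col, dist) :: rest, visited =>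
    if pvCell grid row col == "X" then dist
    else
      let st := pvDirs.foldl (fun st dir =>
        let nr := row + dir.1
        let nc := col + dir.2
        if (decide (0 ≤ nr) && decide (nr < N) && decide (0 ≤ nc) && decide (nc < M))
            && !(PySem.Set.contains st.2 (nr, nc)) then
          (st.1 ++ [(nr, nc, dist + 1)], PySem.Set.add st.2 (nr, nc))
        else st) (rest, visited)
      pvBfs grid N M fuel st.1 st.2

def shortestXYDist (grid : List (List String)) (N : Int) (M : Int) : Int :=
  let st := pvInitA grid N M
  pvBfs grid N M (N.toNat * M.toNat + 1) st.1 st.2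

-- ===== PORT B =====
-- one scan collecting X positions and Y positions
def pvScanB (grid : List (List String)) (N M : Int) :
    List (Int × Int) × List (Int × Int) :=
  (PySem.List.pyRange 0 N 1).foldl (fun st u =>
    (PySem.List.pyRange 0 M 1).foldl (fun st v =>
      if pvCell grid u v == "X" then (st.1 ++ [(u, v)], st.2)
      else if pvCell grid u v == "Y" then (st.1, st.2 ++ [(u, v)])
      else st) st) ([], [])

def shortestXYDist_alt (grid : List (List String)) (N : Int) (M : Int) : Int :=
  let st := pvScanB grid N M
  if st.1.isEmpty || st.2.isEmpty then -1
  else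
    (PySem.List.min? (st.1.flatMap (fun x => st.2.map (fun y => |x.1 - y.1| + |x.2 - y.2|)))
      (fun z => z)).getD (-1)

-- ===== PRECONDITION & SPEC =====
-- Pre_ excludes exactly the inputs on which Python A raises IndexError: when the scanned
-- rectangle is nonempty, the grid must actually contain those N rows of length ≥ M.
def Pre_shortestXYDist (grid : List (List String)) (N : Int) (M : Int) : Prop :=
  0 < N → 0 < M → N ≤ grid.length ∧ ∀ row ∈ grid.take N.toNat, M ≤ (row.length : Int)
instance (grid : List (List String)) (N : Int) (M : Int) : Decidable (Pre_shortestXYDist grid N M) := by unfold Pre_shortestXYDist; infer_instance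

def pvWitness_shortestXYDist : List (List String) × Int × Int :=
  ([["Y", "."], [".", "X"]], 2, 2)

def Spec_shortestXYDist (grid : List (List String)) (N : Int) (M : Int) (out : Int) : Prop := out = shortestXYDist_alt grid N M
instance (grid : List (List String)) (N : Int) (M : Int) (out : Int) : Decidable (Spec_shortestXYDist grid N M out) := by unfold Spec_shortestXYDist; infer_instance

-- ===== CLAIM (what is proved, stated in full; the proofs are below) =====
def Claim_equal_shortestXYDist : Prop := ∀ (grid : List (List String)) (N : Int) (M : Int), Dom_shortestXYDist grid N M → Pre_shortestXYDist grid N M → Spec_shortestXYDist grid N M (shortestXYDist grid N M)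


-- ===== LEMMAS AND PROOFS =====

-- in-bounds predicate (the grid rectangle)
abbrev pvInB (N M : Int) (c : Int × Int) : Prop :=
  0 ≤ c.1 ∧ c.1 < N ∧ 0 ≤ c.2 ∧ c.2 < M

-- row-major list of all cells of the rectangle
def pvCells (N M : Int) : List (Int × Int) :=
  (PySem.List.pyRange 0 N 1).flatMap (fun u => (PySem.List.pyRange 0 M 1).map (fun v => (u, v)))

def pvYs (grid : List (List String)) (N M : Int) : List (Int × Int) :=
  (pvCells N M).filter (fun c => pvCell grid c.1 c.2 == "Y")

def pvXs (grid : List (List String)) (N M : Int) : List (Int × Int) :=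
  (pvCells N M).filter (fun c => pvCell grid c.1 c.2 == "X")

-- Manhattan distance
def pvMd (a b : Int × Int) : Int := |a.1 - b.1| + |a.2 - b.2|

-- min of a list (0 on [])
def pvMinL : List Int → Int
  | [] => 0
  | x :: t => t.foldl min x

-- distance to the nearest source in ys
def pvDY (ys : List (Int × Int)) (c : Int × Int) : Int :=
  pvMinL (ys.map (fun y => pvMd y c))

-- the cells newly enqueued when the candidate list L is processed against visited vis
def pvNew (N M : Int) : List (Int × Int) → List (Int × Int) → List (Int × Int)
  | _, [] => []
  | vis, c :: L =>
    if (0 ≤ c.1 ∧ c.1 < N ∧ 0 ≤ c.2 ∧ c.2 < M) ∧ c ∉ vis then c :: pvNew N M (vis ++ [c]) L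
    else pvNew N M vis L

-- ----- pvMinL -----
lemma pvFoldMin_le_init (t : List Int) : ∀ x : Int, t.foldl min x ≤ x := by
  induction t with
  | nil => intro x; exact le_refl x
  | cons a t ih => intro x; exact le_trans (ih (min x a)) (min_le_left x a)

lemma pvFoldMin_le_mem (t : List Int) : ∀ (x a : Int), a ∈ t → t.foldl min x ≤ a := by
  induction t with
  | nil => intro x a ha; simp at ha
  | cons b t ih =>
    intro x a ha
    rcases List.mem_cons.mp ha with h | h
    · subst h; exact le_trans (pvFoldMin_le_init t (min x a)) (min_le_right x a)
    · exact ih (min x b) a h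

lemma pvFoldMin_mem (t : List Int) : ∀ x : Int, t.foldl min x = x ∨ t.foldl min x ∈ t := by
  induction t with
  | nil => intro x; left; rfl
  | cons a t ih =>
    intro x
    rcases ih (min x a) with h | h
    · rcases min_choice x a with hm | hm
      · left; simpa [hm] using h
      · right; simp only [List.foldl_cons]; rw [h, hm]; exact List.mem_cons_self
    · right; exact List.mem_cons_of_mem _ h

lemma pvFoldMin_min (t : List Int) : ∀ (y z : Int), t.foldl min (min y z) = min y (t.foldl min z) := by
  induction t with
  | nil => intro y z; rfl
  | cons a t ih =>
    intro y z
    simp only [List.foldl_cons]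
    rw [min_assoc, ih]

lemma pvMinL_le (l : List Int) (a : Int) (ha : a ∈ l) : pvMinL l ≤ a := by
  cases l with
  | nil => simp at ha
  | cons x t =>
    rcases List.mem_cons.mp ha with h | h
    · subst h; exact pvFoldMin_le_init t a
    · exact pvFoldMin_le_mem t x a h

lemma pvMinL_mem (l : List Int) (hl : l ≠ []) : pvMinL l ∈ l := by
  cases l with
  | nil => exact absurd rfl hl
  | cons x t =>
    rcases pvFoldMin_mem t x with h | h
    · rw [show pvMinL (x :: t) = t.foldl min x from rfl, h]; exact List.mem_cons_self
    · exact List.mem_cons_of_mem _ h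

lemma pvMinL_eq (l : List Int) (v : Int) (hv : v ∈ l) (hle : ∀ a ∈ l, v ≤ a) : pvMinL l = v := by
  have h1 : pvMinL l ≤ v := pvMinL_le l v hv
  have h2 : v ≤ pvMinL l := hle _ (pvMinL_mem l (List.ne_nil_of_mem hv))
  omega

lemma pvMinL_cons (a : Int) (l : List Int) (hl : l ≠ []) :
    pvMinL (a :: l) = min a (pvMinL l) := by
  cases l with
  | nil => exact absurd rfl hl
  | cons z t =>
    show (z :: t).foldl min a = min a (t.foldl min z)
    rw [List.foldl_cons, ← pvFoldMin_min]

lemma pvMinL_append (l1 l2 : List Int) (h1 : l1 ≠ []) (h2 : l2 ≠ []) :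
    pvMinL (l1 ++ l2) = min (pvMinL l1) (pvMinL l2) := by
  cases l1 with
  | nil => exact absurd rfl h1
  | cons x t =>
    cases l2 with
    | nil => exact absurd rfl h2
    | cons z t2 =>
      show (t ++ (z :: t2)).foldl min x = min (t.foldl min x) (t2.foldl min z)
      rw [List.foldl_append, List.foldl_cons, pvFoldMin_min]

lemma pvMinL_flatMap {α : Type} (xs : List α) (f : α → List Int) (hxs : xs ≠ [])
    (hf : ∀ x ∈ xs, f x ≠ []) :
    pvMinL (xs.flatMap f) = pvMinL (xs.map (fun x => pvMinL (f x))) := by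
  induction xs with
  | nil => exact absurd rfl hxs
  | cons x xs ih =>
    cases xs with
    | nil => simp [List.flatMap]; rfl
    | cons x' xs' =>
      have hfm : (x' :: xs').flatMap f ≠ [] := by
        have : f x' ≠ [] := hf x' (by simp)
        cases hfx' : f x' with
        | nil => exact absurd hfx' this
        | cons b bs => simp [List.flatMap_cons, hfx']
      have hmap : ((x' :: xs').map fun x => pvMinL (f x)) ≠ [] := by simp
      rw [List.flatMap_cons, pvMinL_append _ _ (hf x (by simp)) hfm,
        List.map_cons, pvMinL_cons _ _ hmap,
        ih (by simp) (fun y hy => hf y (List.mem_cons_of_mem _ hy))]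

-- ----- pvMd -----
lemma pvMd_nonneg (a b : Int × Int) : 0 ≤ pvMd a b := by
  have := abs_nonneg (a.1 - b.1); have := abs_nonneg (a.2 - b.2); simp [pvMd]; omega

lemma pvMd_self (a : Int × Int) : pvMd a a = 0 := by simp [pvMd]

lemma pvMd_eq_zero (a b : Int × Int) (h : pvMd a b = 0) : a = b := by
  rcases a with ⟨a1, a2⟩; rcases b with ⟨b1, b2⟩
  simp [pvMd] at h
  have h1 := abs_nonneg (a1 - b1); have h2 := abs_nonneg (a2 - b2)
  have e1 : a1 - b1 = 0 := by
    have : |a1 - b1| = 0 := by omega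
    exact abs_eq_zero.mp this
  have e2 : a2 - b2 = 0 := by
    have : |a2 - b2| = 0 := by omega
    exact abs_eq_zero.mp this
  simp [Prod.ext_iff]; omega

lemma pvMd_triangle (a b c : Int × Int) : pvMd a c ≤ pvMd a b + pvMd b c := by
  have t1 : |a.1 - c.1| ≤ |a.1 - b.1| + |b.1 - c.1| := abs_sub_le _ _ _
  have t2 : |a.2 - c.2| ≤ |a.2 - b.2| + |b.2 - c.2| := abs_sub_le _ _ _
  simp [pvMd]; omega

lemma pvMd_eq_one_iff (r c : Int × Int) :
    pvMd r c = 1 ↔ (c.1 = r.1 - 1 ∧ c.2 = r.2) ∨ (c.1 = r.1 + 1 ∧ c.2 = r.2) ∨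
      (c.1 = r.1 ∧ c.2 = r.2 + 1) ∨ (c.1 = r.1 ∧ c.2 = r.2 - 1) := by
  unfold pvMd
  rcases abs_cases (r.1 - c.1) with ⟨e1, _⟩ | ⟨e1, _⟩ <;>
    rcases abs_cases (r.2 - c.2) with ⟨e2, _⟩ | ⟨e2, _⟩ <;> rw [e1, e2] <;> omega

-- ----- pvDY -----
lemma pvDY_le (ys : List (Int × Int)) (c y : Int × Int) (hy : y ∈ ys) :
    pvDY ys c ≤ pvMd y c := by
  exact pvMinL_le _ _ (List.mem_map.mpr ⟨y, hy, rfl⟩)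

lemma pvDY_attained (ys : List (Int × Int)) (c : Int × Int) (hys : ys ≠ []) :
    ∃ y ∈ ys, pvDY ys c = pvMd y c := by
  have := pvMinL_mem ((ys.map (fun y => pvMd y c))) (by simpa using hys)
  rcases List.mem_map.mp this with ⟨y, hy, he⟩
  exact ⟨y, hy, he.symm⟩

lemma pvDY_nonneg (ys : List (Int × Int)) (c : Int × Int) (hys : ys ≠ []) :
    0 ≤ pvDY ys c := by
  rcases pvDY_attained ys c hys with ⟨y, _, he⟩
  rw [he]; exact pvMd_nonneg _ _

lemma pvDY_le_add (ys : List (Int × Int)) (c n : Int × Int) (hys : ys ≠ []) :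
    pvDY ys c ≤ pvDY ys n + pvMd n c := by
  rcases pvDY_attained ys n hys with ⟨y, hy, he⟩
  calc pvDY ys c ≤ pvMd y c := pvDY_le ys c y hy
    _ ≤ pvMd y n + pvMd n c := pvMd_triangle _ _ _
    _ = pvDY ys n + pvMd n c := by rw [he]

lemma pvDY_mem_zero (ys : List (Int × Int)) (y : Int × Int) (hy : y ∈ ys) (hys : ys ≠ []) :
    pvDY ys y = 0 := by
  have h1 : pvDY ys y ≤ 0 := by
    have := pvDY_le ys y y hy; rwa [pvMd_self] at this
  have h2 := pvDY_nonneg ys y hys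
  omega

lemma pvDY_zero_mem (ys : List (Int × Int)) (c : Int × Int) (hys : ys ≠ [])
    (h : pvDY ys c = 0) : c ∈ ys := by
  rcases pvDY_attained ys c hys with ⟨y, hy, he⟩
  have : pvMd y c = 0 := by omega
  have := pvMd_eq_zero _ _ this
  rwa [← this]

lemma pvDY_step_aux (ys : List (Int × Int)) (c n y : Int × Int) (hys : ys ≠ [])
    (hy : y ∈ ys) (he : pvDY ys c = pvMd y c) (h1 : pvMd y n = pvMd y c - 1)
    (h2 : pvMd n c = 1) : pvDY ys n = pvDY ys c - 1 := by
  have hle : pvDY ys n ≤ pvMd y n := pvDY_le ys n y hy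
  have hge : pvDY ys c ≤ pvDY ys n + pvMd n c := pvDY_le_add ys c n hys
  omega

-- step toward a nearest source: every cell at positive distance has an in-bounds
-- neighbour one closer
lemma pvDY_step (N M : Int) (ys : List (Int × Int)) (c : Int × Int) (hys : ys ≠ [])
    (hin : ∀ y ∈ ys, pvInB N M y) (hc : pvInB N M c) (hpos : 0 < pvDY ys c) :
    ∃ n, pvInB N M n ∧ pvMd n c = 1 ∧ pvDY ys n = pvDY ys c - 1 := by
  rcases pvDY_attained ys c hys with ⟨y, hy, he⟩
  obtain ⟨hy1, hy2, hy3, hy4⟩ := hin y hy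
  obtain ⟨hc1, hc2, hc3, hc4⟩ := hc
  have hmd : 0 < pvMd y c := by omega
  rcases lt_trichotomy y.1 c.1 with h | h | h
  · refine ⟨(c.1 - 1, c.2), ⟨by omega, by omega, by omega, by omega⟩, ?_, ?_⟩
    · show |c.1 - 1 - c.1| + |c.2 - c.2| = 1
      rw [show c.1 - 1 - c.1 = -1 by ring, show c.2 - c.2 = 0 by ring]; norm_num
    · refine pvDY_step_aux ys c _ y hys hy he ?_ ?_
      · show |y.1 - (c.1 - 1)| + |y.2 - c.2| = pvMd y c - 1
        unfold pvMd
        rw [abs_of_nonpos (show y.1 - (c.1 - 1) ≤ 0 by omega),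
          abs_of_nonpos (show y.1 - c.1 ≤ 0 by omega)]
        ring
      · show |c.1 - 1 - c.1| + |c.2 - c.2| = 1
        rw [show c.1 - 1 - c.1 = -1 by ring, show c.2 - c.2 = 0 by ring]; norm_num
  · -- y.1 = c.1, so y.2 ≠ c.2
    have hne : y.2 ≠ c.2 := by
      intro hcon
      have : pvMd y c = 0 := by
        unfold pvMd; rw [show y.1 - c.1 = 0 by omega, show y.2 - c.2 = 0 by omega]; norm_num
      omega
    rcases lt_or_gt_of_ne hne with h2 | h2
    · refine ⟨(c.1, c.2 - 1), ⟨by omega, by omega, by omega, by omega⟩, ?_, ?_⟩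
      · show |c.1 - c.1| + |c.2 - 1 - c.2| = 1
        rw [show c.1 - c.1 = 0 by ring, show c.2 - 1 - c.2 = -1 by ring]; norm_num
      · refine pvDY_step_aux ys c _ y hys hy he ?_ ?_
        · show |y.1 - c.1| + |y.2 - (c.2 - 1)| = pvMd y c - 1
          unfold pvMd
          rw [abs_of_nonpos (show y.2 - (c.2 - 1) ≤ 0 by omega),
            abs_of_nonpos (show y.2 - c.2 ≤ 0 by omega)]
          ring
        · show |c.1 - c.1| + |c.2 - 1 - c.2| = 1
          rw [show c.1 - c.1 = 0 by ring, show c.2 - 1 - c.2 = -1 by ring]; norm_num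
    · refine ⟨(c.1, c.2 + 1), ⟨by omega, by omega, by omega, by omega⟩, ?_, ?_⟩
      · show |c.1 - c.1| + |c.2 + 1 - c.2| = 1
        rw [show c.1 - c.1 = 0 by ring, show c.2 + 1 - c.2 = 1 by ring]; norm_num
      · refine pvDY_step_aux ys c _ y hys hy he ?_ ?_
        · show |y.1 - c.1| + |y.2 - (c.2 + 1)| = pvMd y c - 1
          unfold pvMd
          rw [abs_of_nonneg (show 0 ≤ y.2 - (c.2 + 1) by omega),
            abs_of_nonneg (show 0 ≤ y.2 - c.2 by omega)]
          ring
        · show |c.1 - c.1| + |c.2 + 1 - c.2| = 1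
          rw [show c.1 - c.1 = 0 by ring, show c.2 + 1 - c.2 = 1 by ring]; norm_num
  · refine ⟨(c.1 + 1, c.2), ⟨by omega, by omega, by omega, by omega⟩, ?_, ?_⟩
    · show |c.1 + 1 - c.1| + |c.2 - c.2| = 1
      rw [show c.1 + 1 - c.1 = 1 by ring, show c.2 - c.2 = 0 by ring]; norm_num
    · refine pvDY_step_aux ys c _ y hys hy he ?_ ?_
      · show |y.1 - (c.1 + 1)| + |y.2 - c.2| = pvMd y c - 1
        unfold pvMd
        rw [abs_of_nonneg (show 0 ≤ y.1 - (c.1 + 1) by omega),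
          abs_of_nonneg (show 0 ≤ y.1 - c.1 by omega)]
        ring
      · show |c.1 + 1 - c.1| + |c.2 - c.2| = 1
        rw [show c.1 + 1 - c.1 = 1 by ring, show c.2 - c.2 = 0 by ring]; norm_num

-- no cells at distance d+1 means no cells at any distance above d
lemma pvNoLayer (N M : Int) (ys : List (Int × Int)) (d : Int) (hys : ys ≠ [])
    (hin : ∀ y ∈ ys, pvInB N M y) (hd : 0 ≤ d)
    (hempty : ∀ c, pvInB N M c → pvDY ys c ≠ d + 1) :
    ∀ c, pvInB N M c → pvDY ys c ≤ d := by
  have key : ∀ n : Nat, ∀ c, pvInB N M c → pvDY ys c ≠ d + 1 + n := by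
    intro n
    induction n with
    | zero => intro c hc; simpa using hempty c hc
    | succ n ih =>
      intro c hc hEq
      have hpos : 0 < pvDY ys c := by omega
      rcases pvDY_step N M ys c hys hin hc hpos with ⟨m, hmB, _, hmEq⟩
      exact ih m hmB (by omega)
  intro c hc
  by_contra hcon
  exact key (pvDY ys c - d - 1).toNat c hc (by omega)

-- ----- the cell lists -----
lemma mem_pvCells (N M : Int) (c : Int × Int) : c ∈ pvCells N M ↔ pvInB N M c := by
  rcases c with ⟨a, b⟩
  simp [pvCells, PySem.List.mem_pyRange_one]
  tauto

lemma nodup_pvCells (N M : Int) : (pvCells N M).Nodup := by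
  unfold pvCells
  rw [List.nodup_flatMap]
  constructor
  · intro u _
    exact (PySem.List.nodup_pyRange_one 0 M).map (by intro a b h; injection h with h1 h2)
  · apply List.Pairwise.imp ?_ (PySem.List.pairwise_lt_pyRange_one 0 N)
    intro a b hab
    simp only [List.Disjoint]
    intro c hca hcb
    rcases List.mem_map.mp hca with ⟨v, _, rfl⟩
    rcases List.mem_map.mp hcb with ⟨w, _, hw⟩
    have : b = a := by injection hw with h1 h2
    omega

lemma length_pvCells (N M : Int) : (pvCells N M).length = N.toNat * M.toNat := by
  simp [pvCells, List.length_flatMap]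

lemma mem_pvYs (grid : List (List String)) (N M : Int) (c : Int × Int) :
    c ∈ pvYs grid N M ↔ pvInB N M c ∧ pvCell grid c.1 c.2 = "Y" := by
  simp [pvYs, List.mem_filter, mem_pvCells]

lemma mem_pvXs (grid : List (List String)) (N M : Int) (c : Int × Int) :
    c ∈ pvXs grid N M ↔ pvInB N M c ∧ pvCell grid c.1 c.2 = "X" := by
  simp [pvXs, List.mem_filter, mem_pvCells]

lemma nodup_pvYs (grid : List (List String)) (N M : Int) : (pvYs grid N M).Nodup :=
  (nodup_pvCells N M).filter _

-- a Nodup list enumerating exactly the cells satisfying p has length countP p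
lemma pvLength_eq_countP (l ts : List (Int × Int)) (p : (Int × Int) → Bool) (hl : l.Nodup)
    (hts : ts.Nodup) (h : ∀ c, c ∈ ts ↔ (c ∈ l ∧ p c = true)) :
    ts.length = l.countP p := by
  have hperm : ts.Perm (l.filter p) := by
    rw [List.perm_ext_iff_of_nodup hts (hl.filter p)]
    intro a; rw [h a, List.mem_filter]
  rw [hperm.length_eq, l.countP_eq_length_filter]

lemma pvCountP_split (l : List (Int × Int)) (f : (Int × Int) → Int) (d : Int) :
    l.countP (fun c => decide (d ≤ f c)) =
      l.countP (fun c => decide (f c = d)) + l.countP (fun c => decide (d + 1 ≤ f c)) := by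
  induction l with
  | nil => simp
  | cons a l ih =>
    simp only [List.countP_cons, ih]
    by_cases h1 : f a = d <;> by_cases h2 : d ≤ f a <;> by_cases h3 : d + 1 ≤ f a <;>
      simp [h1, h2, h3] <;> omega

-- ----- characterization of the two scans -----
lemma pvInitA_inner (grid : List (List String)) (u : Int) :
    ∀ (l : List Int) (q : List (Int × Int × Int)) (s : PySem.Set (Int × Int)),
    l.foldl (fun st v =>
        if pvCell grid u v == "Y" then (st.1 ++ [(u, v, (0 : Int))], PySem.Set.add st.2 (u, v))
        else st) (q, s)
    = (q ++ ((l.filter (fun v => pvCell grid u v == "Y")).map (fun v => (u, v, (0 : Int)))),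
       PySem.Set.update s ((l.filter (fun v => pvCell grid u v == "Y")).map (fun v => (u, v)))) := by
  intro l
  induction l with
  | nil => intro q s; simp [PySem.Set.update_nil]
  | cons v l ih =>
    intro q s
    by_cases h : (pvCell grid u v == "Y") = true
    · rw [List.foldl_cons, if_pos h, ih]
      simp [h, PySem.Set.update_cons]
    · rw [List.foldl_cons, if_neg h, ih]
      simp [h]

lemma pvInitA_eq (grid : List (List String)) (N M : Int) :
    pvInitA grid N M = ((pvYs grid N M).map (fun c => (c.1, c.2, (0 : Int))), pvYs grid N M) := by
  have outer : ∀ (us : List Int) (q : List (Int × Int × Int)) (s : PySem.Set (Int × Int)),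
      us.foldl (fun st u =>
        (PySem.List.pyRange 0 M 1).foldl (fun st v =>
          if pvCell grid u v == "Y" then (st.1 ++ [(u, v, (0 : Int))], PySem.Set.add st.2 (u, v))
          else st) st) (q, s)
      = (q ++ (us.flatMap (fun u =>
            ((PySem.List.pyRange 0 M 1).filter (fun v => pvCell grid u v == "Y")).map
              (fun v => (u, v)))).map (fun c => (c.1, c.2, (0 : Int))),
         PySem.Set.update s (us.flatMap (fun u =>
            ((PySem.List.pyRange 0 M 1).filter (fun v => pvCell grid u v == "Y")).map
              (fun v => (u, v))))) := by
    intro us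
    induction us with
    | nil => intro q s; simp [PySem.Set.update_nil]
    | cons u us ih =>
      intro q s
      rw [List.foldl_cons, pvInitA_inner grid u, ih]
      simp [List.flatMap_cons, PySem.Set.update_append, List.map_map, Function.comp_def]
  have hys : pvYs grid N M = (PySem.List.pyRange 0 N 1).flatMap (fun u =>
      ((PySem.List.pyRange 0 M 1).filter (fun v => pvCell grid u v == "Y")).map
        (fun v => (u, v))) := by
    unfold pvYs pvCells
    rw [List.filter_flatMap]
    simp [List.filter_map, Function.comp_def]
  unfold pvInitA
  rw [outer, hys]
  have hnodup : (pvYs grid N M).Nodup := nodup_pvYs grid N M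
  rw [hys] at hnodup
  have : PySem.Set.ofList [] = ([] : List (Int × Int)) := rfl
  rw [this]
  have hupd : ∀ (l : List (Int × Int)), PySem.Set.update ([] : List (Int × Int)) l
      = PySem.Set.ofList l := by
    intro l; rw [PySem.Set.ofList_eq_foldl]; rfl
  rw [hupd, PySem.Set.ofList_eq_self_of_nodup _ hnodup]
  simp

lemma pvScanB_inner (grid : List (List String)) (u : Int) :
    ∀ (l : List Int) (a b : List (Int × Int)),
    l.foldl (fun st v =>
        if pvCell grid u v == "X" then (st.1 ++ [(u, v)], st.2)
        else if pvCell grid u v == "Y" then (st.1, st.2 ++ [(u, v)])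
        else st) (a, b)
    = (a ++ ((l.filter (fun v => pvCell grid u v == "X")).map (fun v => (u, v))),
       b ++ ((l.filter (fun v => pvCell grid u v == "Y")).map (fun v => (u, v)))) := by
  intro l
  induction l with
  | nil => intro a b; simp
  | cons v l ih =>
    intro a b
    by_cases hX : (pvCell grid u v == "X") = true
    · have hY : ¬ (pvCell grid u v == "Y") = true := by
        simp only [beq_iff_eq] at hX ⊢; rw [hX]; decide
      rw [List.foldl_cons, if_pos hX, ih]
      simp [hX, hY]
    · by_cases hY : (pvCell grid u v == "Y") = true
      · rw [List.foldl_cons, if_neg hX, if_pos hY, ih]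
        simp [hX, hY]
      · rw [List.foldl_cons, if_neg hX, if_neg hY, ih]
        simp [hX, hY]

lemma pvScanB_eq (grid : List (List String)) (N M : Int) :
    pvScanB grid N M = (pvXs grid N M, pvYs grid N M) := by
  have outer : ∀ (us : List Int) (a b : List (Int × Int)),
      us.foldl (fun st u =>
        (PySem.List.pyRange 0 M 1).foldl (fun st v =>
          if pvCell grid u v == "X" then (st.1 ++ [(u, v)], st.2)
          else if pvCell grid u v == "Y" then (st.1, st.2 ++ [(u, v)])
          else st) st) (a, b)
      = (a ++ (us.flatMap (fun u =>
            ((PySem.List.pyRange 0 M 1).filter (fun v => pvCell grid u v == "X")).map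
              (fun v => (u, v)))),
         b ++ (us.flatMap (fun u =>
            ((PySem.List.pyRange 0 M 1).filter (fun v => pvCell grid u v == "Y")).map
              (fun v => (u, v))))) := by
    intro us
    induction us with
    | nil => intro a b; simp
    | cons u us ih =>
      intro a b
      rw [List.foldl_cons, pvScanB_inner grid u, ih]
      simp [List.flatMap_cons]
  have hys : pvYs grid N M = (PySem.List.pyRange 0 N 1).flatMap (fun u =>
      ((PySem.List.pyRange 0 M 1).filter (fun v => pvCell grid u v == "Y")).map
        (fun v => (u, v))) := by
    unfold pvYs pvCells
    rw [List.filter_flatMap]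
    simp [List.filter_map, Function.comp_def]
  have hxs : pvXs grid N M = (PySem.List.pyRange 0 N 1).flatMap (fun u =>
      ((PySem.List.pyRange 0 M 1).filter (fun v => pvCell grid u v == "X")).map
        (fun v => (u, v))) := by
    unfold pvXs pvCells
    rw [List.filter_flatMap]
    simp [List.filter_map, Function.comp_def]
  unfold pvScanB
  rw [outer, hys, hxs]
  simp

-- ----- the direction fold -----
lemma pvNew_sub (N M : Int) : ∀ (L vis : List (Int × Int)) (c : Int × Int),
    c ∈ pvNew N M vis L → pvInB N M c ∧ c ∉ vis ∧ c ∈ L := by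
  intro L
  induction L with
  | nil => intro vis c hc; simp [pvNew] at hc
  | cons a L ih =>
    intro vis c hc
    rw [pvNew] at hc
    split_ifs at hc with h
    · rcases List.mem_cons.mp hc with rfl | hc2
      · exact ⟨h.1, h.2, List.mem_cons_self⟩
      · obtain ⟨h1, h2, h3⟩ := ih (vis ++ [a]) c hc2
        exact ⟨h1, fun hx => h2 (List.mem_append_left _ hx), List.mem_cons_of_mem _ h3⟩
    · obtain ⟨h1, h2, h3⟩ := ih vis c hc
      exact ⟨h1, h2, List.mem_cons_of_mem _ h3⟩

lemma pvNew_nodup (N M : Int) : ∀ (L vis : List (Int × Int)), (pvNew N M vis L).Nodup := by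
  intro L
  induction L with
  | nil => intro vis; simp [pvNew]
  | cons a L ih =>
    intro vis
    rw [pvNew]
    split_ifs with h
    · refine List.nodup_cons.mpr ⟨?_, ih (vis ++ [a])⟩
      intro hmem
      obtain ⟨_, h2, _⟩ := pvNew_sub N M L (vis ++ [a]) a hmem
      exact h2 (List.mem_append_right _ (by simp))
    · exact ih vis

lemma pvNew_complete (N M : Int) : ∀ (L vis : List (Int × Int)) (c : Int × Int),
    c ∈ L → pvInB N M c → c ∉ vis → c ∈ pvNew N M vis L := by
  intro L
  induction L with
  | nil => intro vis c hc; simp at hc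
  | cons a L ih =>
    intro vis c hc hB hv
    rw [pvNew]
    rcases List.mem_cons.mp hc with rfl | hc2
    · rw [if_pos ⟨hB, hv⟩]; exact List.mem_cons_self
    · split_ifs with h
      · by_cases hca : c = a
        · subst hca; exact List.mem_cons_self
        · exact List.mem_cons_of_mem _
            (ih (vis ++ [a]) c hc2 hB (by simp [hca, hv]))
      · exact ih vis c hc2 hB hv

lemma pvFold_char (N M row col dist : Int) :
    ∀ (D : List (Int × Int)) (q : List (Int × Int × Int)) (vis : PySem.Set (Int × Int)),
    D.foldl (fun st dir =>
        let nr := row + dir.1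
        let nc := col + dir.2
        if (decide (0 ≤ nr) && decide (nr < N) && decide (0 ≤ nc) && decide (nc < M))
            && !(PySem.Set.contains st.2 (nr, nc)) then
          (st.1 ++ [(nr, nc, dist + 1)], PySem.Set.add st.2 (nr, nc))
        else st) (q, vis)
    = (q ++ (pvNew N M vis (D.map (fun t => (row + t.1, col + t.2)))).map
          (fun c => (c.1, c.2, dist + 1)),
       vis ++ pvNew N M vis (D.map (fun t => (row + t.1, col + t.2)))) := by
  intro D
  induction D with
  | nil => intro q vis; simp [pvNew]
  | cons dir D ih =>
    intro q vis
    rw [List.foldl_cons, List.map_cons, pvNew]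
    by_cases h : (0 ≤ row + dir.1 ∧ row + dir.1 < N ∧ 0 ≤ col + dir.2 ∧ col + dir.2 < M) ∧
        (row + dir.1, col + dir.2) ∉ vis
    · have hbool : ((decide (0 ≤ row + dir.1) && decide (row + dir.1 < N) &&
          decide (0 ≤ col + dir.2) && decide (col + dir.2 < M))
          && !(PySem.Set.contains vis (row + dir.1, col + dir.2))) = true := by
        obtain ⟨⟨h1, h2, h3, h4⟩, h5⟩ := h
        simp [h1, h2, h3, h4, PySem.Set.contains_eq_listContains, h5]
      rw [if_pos h]
      simp only [hbool, if_true]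
      rw [PySem.Set.add_of_not_mem h.2, ih]
      simp
    · have hbool : ((decide (0 ≤ row + dir.1) && decide (row + dir.1 < N) &&
          decide (0 ≤ col + dir.2) && decide (col + dir.2 < M))
          && !(PySem.Set.contains vis (row + dir.1, col + dir.2))) = false := by
        by_cases hc : (row + dir.1, col + dir.2) ∈ vis
        · simp [PySem.Set.contains_eq_listContains, hc]
        · have hb : ¬(0 ≤ row + dir.1) ∨ ¬(row + dir.1 < N) ∨ ¬(0 ≤ col + dir.2) ∨
              ¬(col + dir.2 < M) := by tauto
          rcases hb with h' | h' | h' | h' <;> simp [h']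
      rw [if_neg h]
      simp only [hbool, Bool.false_eq_true, if_false]
      exact ih q vis

lemma pvBfs_nil (grid : List (List String)) (N M : Int) (fuel : Nat)
    (vis : PySem.Set (Int × Int)) : pvBfs grid N M fuel [] vis = -1 := by
  cases fuel <;> rfl

-- the four shifted neighbours are exactly the cells at Manhattan distance 1
lemma pvAdj_of_dirs (r : Int × Int) : ∀ t ∈ pvDirs, pvMd r (r.1 + t.1, r.2 + t.2) = 1 := by
  intro t ht
  rw [pvMd_eq_one_iff]
  fin_cases ht <;> norm_num <;> omega

lemma pvMem_dirs (r c : Int × Int) (h : pvMd r c = 1) :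
    c ∈ pvDirs.map (fun t => (r.1 + t.1, r.2 + t.2)) := by
  rw [pvMd_eq_one_iff] at h
  rcases c with ⟨c1, c2⟩
  simp only [pvDirs, List.map_cons, List.map_nil, List.mem_cons, List.not_mem_nil, or_false,
    Prod.mk.injEq] at *
  omega

-- ----- the main BFS invariant -----
lemma pvBfs_main (grid : List (List String)) (N M : Int) (hys : pvYs grid N M ≠ []) :
    ∀ (k : Nat) (d : Int) (rem next : List (Int × Int)) (visited : PySem.Set (Int × Int))
      (fuel : Nat),
      k = 2 * (rem.length +
            (pvCells N M).countP (fun c => decide (d + 1 ≤ pvDY (pvYs grid N M) c)))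
          + (if rem = [] then 1 else 0) →
      0 ≤ d →
      (∀ c ∈ rem, pvInB N M c ∧ pvDY (pvYs grid N M) c = d) →
      (∀ c ∈ next, pvInB N M c ∧ pvDY (pvYs grid N M) c = d + 1) →
      rem.Nodup → next.Nodup →
      (∀ c : Int × Int, c ∈ visited ↔ ((pvInB N M c ∧ pvDY (pvYs grid N M) c ≤ d) ∨ c ∈ next)) →
      (∀ c : Int × Int, pvInB N M c → pvDY (pvYs grid N M) c = d + 1 →
        (c ∈ next ∨ ∃ r ∈ rem, pvMd r c = 1)) →
      (∀ x ∈ pvXs grid N M, d ≤ pvDY (pvYs grid N M) x) →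
      (∀ c : Int × Int, pvInB N M c → pvDY (pvYs grid N M) c = d →
        pvCell grid c.1 c.2 = "X" → c ∈ rem) →
      rem.length + (pvCells N M).countP (fun c => decide (d + 1 ≤ pvDY (pvYs grid N M) c)) ≤ fuel →
      pvBfs grid N M fuel
          (rem.map (fun c => (c.1, c.2, d)) ++ next.map (fun c => (c.1, c.2, d + 1))) visited
        = (if pvXs grid N M = [] then -1
           else pvMinL ((pvXs grid N M).map (pvDY (pvYs grid N M)))) := by
  have hinYs : ∀ y ∈ pvYs grid N M, pvInB N M y :=
    fun y hy => ((mem_pvYs grid N M y).mp hy).1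
  intro k
  induction k using Nat.strong_induction_on with
  | _ k IH =>
  intro d rem next visited fuel hk hd hrem hnext hremN hnextN hvis hcov hxlb hxrem hfuel
  cases rem with
  | nil =>
    cases hnx : next with
    | nil =>
      subst hnx
      have hlayerEmpty : ∀ c, pvInB N M c → pvDY (pvYs grid N M) c ≠ d + 1 := by
        intro c hc hEq
        rcases hcov c hc hEq with h | ⟨r, hr, _⟩
        · simp at h
        · simp at hr
      have hall := pvNoLayer N M (pvYs grid N M) d hys hinYs hd hlayerEmpty
      have hxs : pvXs grid N M = [] := by
        rw [List.eq_nil_iff_forall_not_mem]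
        intro x hx
        obtain ⟨hxB, hxCell⟩ := (mem_pvXs grid N M x).mp hx
        have h1 := hxlb x hx
        have h2 := hall x hxB
        have h3 := hxrem x hxB (by omega) hxCell
        simp at h3
      simp only [List.map_nil, List.append_nil, pvBfs_nil, hxs, if_pos]
    | cons n0 next' =>
      -- the queue now holds exactly the next layer: reinterpret it as the new frontier
      have hnn : next ≠ [] := by rw [hnx]; simp
      have hlen : next.length =
          (pvCells N M).countP (fun c => decide (pvDY (pvYs grid N M) c = d + 1)) := by
        refine pvLength_eq_countP _ _ _ (nodup_pvCells N M) hnextN ?_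
        intro c
        constructor
        · intro hc
          obtain ⟨hB, hD⟩ := hnext c hc
          exact ⟨(mem_pvCells N M c).mpr hB, by simp [hD]⟩
        · rintro ⟨hcell, hD⟩
          have hB := (mem_pvCells N M c).mp hcell
          have hD' : pvDY (pvYs grid N M) c = d + 1 := by simpa using hD
          rcases hcov c hB hD' with h | ⟨r, hr, _⟩
          · exact h
          · simp at hr
      have hsplit := pvCountP_split (pvCells N M) (pvDY (pvYs grid N M)) (d + 1)
      have hkpos : k = 2 * (pvCells N M).countP
          (fun c => decide (d + 1 ≤ pvDY (pvYs grid N M) c)) + 1 := by simpa using hk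
      have happly := IH (k - 1) (by omega) (d + 1) next [] visited fuel
        (by rw [if_neg hnn, hlen]; omega)
        (by omega)
        hnext
        (by simp)
        hnextN
        (by simp)
        (by
          intro c
          rw [hvis c]
          constructor
          · rintro (⟨hB, hle⟩ | h)
            · exact Or.inl ⟨hB, by omega⟩
            · obtain ⟨hB, hD⟩ := hnext c h
              exact Or.inl ⟨hB, by omega⟩
          · rintro (⟨hB, hle⟩ | h)
            · by_cases hc : pvDY (pvYs grid N M) c ≤ d
              · exact Or.inl ⟨hB, hc⟩
              · have hEq : pvDY (pvYs grid N M) c = d + 1 := by omega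
                rcases hcov c hB hEq with h2 | ⟨r, hr, _⟩
                · exact Or.inr h2
                · simp at hr
            · simp at h)
        (by
          intro c hB hEq
          right
          have hpos : 0 < pvDY (pvYs grid N M) c := by omega
          rcases pvDY_step N M (pvYs grid N M) c hys hinYs hB hpos with ⟨n, hnB, hn1, hnEq⟩
          have hnD : pvDY (pvYs grid N M) n = d + 1 := by omega
          rcases hcov n hnB hnD with hn | ⟨r, hr, _⟩
          · exact ⟨n, hn, hn1⟩
          · simp at hr)
        (by
          intro x hx
          have h1 := hxlb x hx
          obtain ⟨hxB, hxC⟩ := (mem_pvXs grid N M x).mp hx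
          by_contra hcon
          have hEq : pvDY (pvYs grid N M) x = d := by omega
          have := hxrem x hxB hEq hxC
          simp at this)
        (by
          intro c hB hEq hC
          rcases hcov c hB hEq with h | ⟨r, hr, _⟩
          · exact h
          · simp at hr)
        (by simp only [List.length_nil] at hfuel; rw [hlen]; omega)
      rw [hnx] at happly
      simpa using happly
  | cons r rem' =>
    obtain ⟨hrB, hrD⟩ := hrem r List.mem_cons_self
    cases fuel with
    | zero => simp at hfuel
    | succ fuel' =>
    rw [List.map_cons, List.cons_append]
    by_cases hX : (pvCell grid r.1 r.2 == "X") = true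
    · have hrx : r ∈ pvXs grid N M :=
        (mem_pvXs grid N M r).mpr ⟨hrB, by simpa using hX⟩
      rw [show pvBfs grid N M (fuel' + 1)
          ((r.1, r.2, d) :: (rem'.map (fun c => (c.1, c.2, d)) ++
            next.map (fun c => (c.1, c.2, d + 1)))) visited = d by simp [pvBfs, hX]]
      rw [if_neg (List.ne_nil_of_mem hrx)]
      refine (pvMinL_eq _ d (List.mem_map.mpr ⟨r, hrx, hrD⟩) ?_).symm
      intro a ha
      rcases List.mem_map.mp ha with ⟨x, hx, rfl⟩
      exact hxlb x hx
    · -- expand from r: enqueue its unvisited in-bounds neighbours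
      have hstep : pvBfs grid N M (fuel' + 1)
          ((r.1, r.2, d) :: (rem'.map (fun c => (c.1, c.2, d)) ++
            next.map (fun c => (c.1, c.2, d + 1)))) visited
          = pvBfs grid N M fuel'
              (rem'.map (fun c => (c.1, c.2, d)) ++ next.map (fun c => (c.1, c.2, d + 1)) ++
                (pvNew N M visited (pvDirs.map (fun t => (r.1 + t.1, r.2 + t.2)))).map
                  (fun c => (c.1, c.2, d + 1)))
              (visited ++ pvNew N M visited (pvDirs.map (fun t => (r.1 + t.1, r.2 + t.2)))) := by
        simp only [pvBfs, hX, Bool.false_eq_true, if_false]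
        rw [pvFold_char N M r.1 r.2 d pvDirs]
      rw [hstep]
      set L := pvDirs.map (fun t => (r.1 + t.1, r.2 + t.2)) with hL
      set nw := pvNew N M visited L with hnw
      have hLadj : ∀ c ∈ L, pvMd r c = 1 := by
        rintro c hc
        rcases List.mem_map.mp hc with ⟨t, ht, rfl⟩
        exact pvAdj_of_dirs r t ht
      have hnwSub := fun c hc => pvNew_sub N M L visited c hc
      have hnwDY : ∀ c ∈ nw, pvDY (pvYs grid N M) c = d + 1 := by
        intro c hc
        obtain ⟨hB, hnv, hcL⟩ := hnwSub c hc
        have hle : pvDY (pvYs grid N M) c ≤ d + 1 := by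
          have := pvDY_le_add (pvYs grid N M) c r hys
          have h1 := hLadj c hcL
          omega
        have hgt : ¬ (pvDY (pvYs grid N M) c ≤ d) := by
          intro hcon
          exact hnv ((hvis c).mpr (Or.inl ⟨hB, hcon⟩))
        omega
      have hnextVis : ∀ c ∈ next, c ∈ visited := fun c hc => (hvis c).mpr (Or.inr hc)
      have hlt : 2 * (rem'.length + (pvCells N M).countP
          (fun c => decide (d + 1 ≤ pvDY (pvYs grid N M) c))) +
          (if rem' = [] then 1 else 0) < k := by
        subst hk
        by_cases h : rem' = [] <;> simp [h] <;> omega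
      have h4 : ∀ c ∈ next ++ nw, pvInB N M c ∧ pvDY (pvYs grid N M) c = d + 1 := by
        intro c hc
        rcases List.mem_append.mp hc with h | h
        · exact hnext c h
        · exact ⟨(hnwSub c h).1, hnwDY c h⟩
      have h6 : (next ++ nw).Nodup := by
        refine List.Nodup.append hnextN (pvNew_nodup N M L visited) ?_
        intro c hc1 hc2
        exact (hnwSub c hc2).2.1 (hnextVis c hc1)
      have h7 : ∀ c : Int × Int, c ∈ visited ++ nw ↔
          ((pvInB N M c ∧ pvDY (pvYs grid N M) c ≤ d) ∨ c ∈ next ++ nw) := by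
        intro c
        rw [List.mem_append, hvis c, List.mem_append]
        tauto
      have h8 : ∀ c : Int × Int, pvInB N M c → pvDY (pvYs grid N M) c = d + 1 →
          (c ∈ next ++ nw ∨ ∃ r'' ∈ rem', pvMd r'' c = 1) := by
        intro c hB hEq
        rcases hcov c hB hEq with h | ⟨r', hr', hadj⟩
        · exact Or.inl (List.mem_append_left _ h)
        · rcases List.mem_cons.mp hr' with rfl | hmem
          · by_cases hcvis : c ∈ visited
            · rcases (hvis c).mp hcvis with ⟨_, hle⟩ | h2
              · omega
              · exact Or.inl (List.mem_append_left _ h2)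
            · exact Or.inl (List.mem_append_right _
                (pvNew_complete N M L visited c (pvMem_dirs r' c hadj) hB hcvis))
          · exact Or.inr ⟨r', hmem, hadj⟩
      have h9 : ∀ c : Int × Int, pvInB N M c → pvDY (pvYs grid N M) c = d →
          pvCell grid c.1 c.2 = "X" → c ∈ rem' := by
        intro c hB hEq hC
        have := hxrem c hB hEq hC
        rcases List.mem_cons.mp this with rfl | hmem
        · exact absurd (by simpa using hC) (by simpa using hX)
        · exact hmem
      have h10 : rem'.length + (pvCells N M).countP
          (fun c => decide (d + 1 ≤ pvDY (pvYs grid N M) c)) ≤ fuel' := by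
        simp only [List.length_cons] at hfuel; omega
      have happly := IH _ hlt d rem' (next ++ nw) (visited ++ nw) fuel' rfl hd
        (fun c hc => hrem c (List.mem_cons_of_mem _ hc)) h4
        (List.Nodup.of_cons hremN) h6 h7 h8 hxlb h9 h10
      rw [List.map_append, ← List.append_assoc] at happly
      exact happly

-- B's value, re-expressed through pvXs/pvYs/pvDY
lemma pvAlt_eq (grid : List (List String)) (N M : Int) :
    shortestXYDist_alt grid N M =
      (if pvXs grid N M = [] ∨ pvYs grid N M = [] then -1
       else pvMinL ((pvXs grid N M).map (pvDY (pvYs grid N M)))) := by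
  unfold shortestXYDist_alt
  rw [pvScanB_eq]
  by_cases hx : pvXs grid N M = []
  · simp [hx]
  · by_cases hy : pvYs grid N M = []
    · simp [hy]
    · rw [if_neg (by simp [List.isEmpty_iff, hx, hy]), if_neg (by tauto)]
      have hflat : (pvXs grid N M).flatMap
          (fun x => (pvYs grid N M).map (fun y => |x.1 - y.1| + |x.2 - y.2|)) ≠ [] := by
        simp only [ne_eq, List.flatMap_eq_nil_iff]
        intro hall
        cases hxl : pvXs grid N M with
        | nil => exact hx hxl
        | cons a t =>
          have := hall a (by rw [hxl]; exact List.mem_cons_self)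
          rw [List.map_eq_nil_iff] at this
          exact hy this
      cases hfl : (pvXs grid N M).flatMap
          (fun x => (pvYs grid N M).map (fun y => |x.1 - y.1| + |x.2 - y.2|)) with
      | nil => exact absurd hfl hflat
      | cons a t =>
        rw [PySem.List.min?_id_cons, Option.getD_some]
        have h1 : List.foldl min a t = pvMinL ((pvXs grid N M).flatMap
            (fun x => (pvYs grid N M).map (fun y => |x.1 - y.1| + |x.2 - y.2|))) := by
          rw [hfl]; rfl
        rw [h1, pvMinL_flatMap _ _ hx (fun x _ => by simpa using hy)]
        congr 1
        apply List.map_congr_left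
        intro x _
        unfold pvDY
        congr 1
        apply List.map_congr_left
        intro y _
        simp [pvMd, abs_sub_comm]


-- A's result, after rewriting the initial scan
lemma pvA_eq (grid : List (List String)) (N M : Int) :
    shortestXYDist grid N M = pvBfs grid N M (N.toNat * M.toNat + 1)
      ((pvYs grid N M).map (fun c => (c.1, c.2, (0 : Int)))) (pvYs grid N M) := by
  unfold shortestXYDist
  rw [pvInitA_eq]

-- ===== VERDICT (by name: the statement is the Claim_ definition above) =====
theorem shortestXYDist_spec : Claim_equal_shortestXYDist := by
  intro grid N M _hDom _hPre
  unfold Spec_shortestXYDist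
  rw [pvAlt_eq, pvA_eq]
  by_cases hy : pvYs grid N M = []
  · simp [hy, pvBfs_nil]
  · have hinYs : ∀ y ∈ pvYs grid N M, pvInB N M y :=
      fun y hy2 => ((mem_pvYs grid N M y).mp hy2).1
    have hylen : (pvYs grid N M).length =
        (pvCells N M).countP (fun c => decide (pvDY (pvYs grid N M) c = 0)) := by
      refine pvLength_eq_countP _ _ _ (nodup_pvCells N M) (nodup_pvYs grid N M) ?_
      intro c
      constructor
      · intro hc
        exact ⟨(mem_pvCells N M c).mpr (hinYs c hc),
          by simp [pvDY_mem_zero _ _ hc hy]⟩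
      · rintro ⟨_, hD⟩
        exact pvDY_zero_mem _ _ hy (by simpa using hD)
    have hsplit := pvCountP_split (pvCells N M) (pvDY (pvYs grid N M)) 0
    have hle := List.countP_le_length
      (p := fun c => decide ((0 : Int) ≤ pvDY (pvYs grid N M) c)) (l := pvCells N M)
    have hlen := length_pvCells N M
    have hmain := pvBfs_main grid N M hy
      (2 * ((pvYs grid N M).length + (pvCells N M).countP
        (fun c => decide (0 + 1 ≤ pvDY (pvYs grid N M) c))) +
        (if pvYs grid N M = [] then 1 else 0))
      0 (pvYs grid N M) [] (pvYs grid N M) (N.toNat * M.toNat + 1) rfl (by omega)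
      (fun c hc => ⟨hinYs c hc, pvDY_mem_zero _ _ hc hy⟩)
      (by simp)
      (nodup_pvYs grid N M)
      (by simp)
      (by
        intro c
        constructor
        · intro hc
          exact Or.inl ⟨hinYs c hc, by rw [pvDY_mem_zero _ _ hc hy]⟩
        · rintro (⟨hB, hle2⟩ | h)
          · have := pvDY_nonneg (pvYs grid N M) c hy
            exact pvDY_zero_mem _ _ hy (by omega)
          · simp at h)
      (by
        intro c hB hEq
        right
        rcases pvDY_step N M (pvYs grid N M) c hy hinYs hB (by omega) with ⟨n, hnB, hn1, hnEq⟩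
        exact ⟨n, pvDY_zero_mem _ _ hy (by omega), hn1⟩)
      (fun x _ => pvDY_nonneg (pvYs grid N M) x hy)
      (fun c _ hEq _ => pvDY_zero_mem _ _ hy hEq)
      (by
        rw [hylen]
        have h01 : (pvCells N M).countP (fun c => decide ((0:Int) + 1 ≤ pvDY (pvYs grid N M) c))
            = (pvCells N M).countP (fun c => decide ((1:Int) ≤ pvDY (pvYs grid N M) c)) := by
          norm_num
        omega)
    have hrhs : (if pvXs grid N M = [] ∨ pvYs grid N M = [] then (-1 : Int)
        else pvMinL ((pvXs grid N M).map (pvDY (pvYs grid N M))))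
        = (if pvXs grid N M = [] then (-1 : Int)
        else pvMinL ((pvXs grid N M).map (pvDY (pvYs grid N M)))) := by
      simp [hy]
    rw [hrhs]
    simpa using hmain
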